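-- pv_equiv track=rewrite | github.com/Cyntwikip/data-science-libraries | cpt2_libs/data_consolidation.py | change_month_to_english
-- ===== SOURCE A (Python) =====
-- def change_month_to_english(month):
--     '''Change Filipino Month to English Month'''
--     month_mapping = {
--         'Ene': 'Jan',
--         'Peb': 'Feb',
--         'Abr': 'Apr',
--         'Hun': 'Jun',
--         'Hul': 'Jul',
--         'Ago': 'Aug',
--         'Set': 'Sep',
--         'Okt': 'Oct',
--         'Nob': 'Nov',
--         'Dis': 'Dec',
--     }
--
--     for fil, eng in month_mapping.items():
--         month = month.replace(fil, eng)
--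
--     return month
-- ===== SOURCE B (Python) =====
-- MONTH_MAPPING = {
--     'Ene': 'Jan', 'Peb': 'Feb', 'Abr': 'Apr', 'Hun': 'Jun', 'Hul': 'Jul',
--     'Ago': 'Aug', 'Set': 'Sep', 'Okt': 'Oct', 'Nob': 'Nov', 'Dis': 'Dec',
-- }
--
-- def change_month_to_english(month):
--     '''Change Filipino Month to English Month (single left-to-right scan).'''
--     out = []
--     i = 0
--     n = len(month)
--     while i < n:
--         eng = MONTH_MAPPING.get(month[i:i+3])
--         if eng is not None:
--             out.append(eng)
--             i += 3
--         else:
--             out.append(month[i])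
--             i += 1
--     return ''.join(out)
-- ===== Notes on version B (the rewrite author's own statement) =====
-- stated objective: alternative
-- what changed: A makes ten sequential full-string str.replace passes (one per Filipino month key); B does a single left-to-right scan that looks each 3-character window up in the mapping dict, emitting the English value and skipping 3 characters on a hit - equivalent because keys start with an uppercase letter, continue lowercase, never overlap, and no replacement value is itself a key.
import Mathlib
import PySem

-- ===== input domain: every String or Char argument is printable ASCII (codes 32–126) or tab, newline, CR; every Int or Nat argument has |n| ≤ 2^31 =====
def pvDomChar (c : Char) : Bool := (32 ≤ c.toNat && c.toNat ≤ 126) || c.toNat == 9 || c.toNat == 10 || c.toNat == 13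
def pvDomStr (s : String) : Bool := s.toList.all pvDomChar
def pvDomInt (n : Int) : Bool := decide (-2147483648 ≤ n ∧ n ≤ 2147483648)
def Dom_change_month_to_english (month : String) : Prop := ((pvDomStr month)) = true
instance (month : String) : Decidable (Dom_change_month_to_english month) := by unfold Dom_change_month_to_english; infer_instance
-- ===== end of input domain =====

-- B replaces A's ten sequential str.replace passes by a single left-to-right scan with a
-- 3-character-window dictionary lookup (alternative decomposition; same observable results).

-- ===== PORT A =====
-- the month_mapping dict of A, in insertion order
def pvItems : List (String × String) :=
  [("Ene", "Jan"), ("Peb", "Feb"), ("Abr", "Apr"), ("Hun", "Jun"), ("Hul", "Jul"),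
   ("Ago", "Aug"), ("Set", "Sep"), ("Okt", "Oct"), ("Nob", "Nov"), ("Dis", "Dec")]

-- A: for fil, eng in month_mapping.items(): month = month.replace(fil, eng)
def change_month_to_english (month : String) : String :=
  pvItems.foldl (fun m p => PySem.Str.replace m p.1 p.2) month

-- ===== PORT B =====
-- B's MONTH_MAPPING, on the character-list level (keys and values are 3-char strings)
def pvMapC : List (List Char × List Char) :=
  [(['E','n','e'], ['J','a','n']), (['P','e','b'], ['F','e','b']), (['A','b','r'], ['A','p','r']),
   (['H','u','n'], ['J','u','n']), (['H','u','l'], ['J','u','l']), (['A','g','o'], ['A','u','g']),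
   (['S','e','t'], ['S','e','p']), (['O','k','t'], ['O','c','t']), (['N','o','b'], ['N','o','v']),
   (['D','i','s'], ['D','e','c'])]

-- B's while loop: look up the 3-char window month[i:i+3]; on a hit emit the value and
-- advance by 3, otherwise emit the character and advance by 1.
def pvScan (s : List Char) : List Char :=
  match s with
  | [] => []
  | c :: t =>
    match pvMapC.find? (fun p => p.1 == (c :: t).take 3) with
    | some p => p.2 ++ pvScan (t.drop 2)
    | none => c :: pvScan t
termination_by s.length
decreasing_by
  · simp only [List.length_cons, List.length_drop]; omega
  · simp only [List.length_cons]; omega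

def change_month_to_english_alt (month : String) : String :=
  String.ofList (pvScan month.toList)

-- ===== PRECONDITION & SPEC =====
def Spec_change_month_to_english (month : String) (out : String) : Prop := out = change_month_to_english_alt month
instance (month : String) (out : String) : Decidable (Spec_change_month_to_english month out) := by unfold Spec_change_month_to_english; infer_instance

-- ===== CLAIM (what is proved, stated in full; the proofs are below) =====
def Claim_equal_change_month_to_english : Prop := ∀ (month : String), Dom_change_month_to_english month → Spec_change_month_to_english month (change_month_to_english month)

-- ===== LEMMAS AND PROOFS =====

-- clean structural form of PySem.Chars.replace (for a nonempty pattern)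
def pvRep (old new : List Char) : List Char → List Char
  | [] => []
  | c :: t =>
    if old.isPrefixOf (c :: t) then new ++ pvRep old new (t.drop (old.length - 1))
    else c :: pvRep old new t
termination_by l => l.length
decreasing_by
  · simp only [List.length_cons, List.length_drop]; omega
  · simp only [List.length_cons]; omega

theorem pvRep_nil (old new : List Char) : pvRep old new [] = [] := by rw [pvRep]

theorem pvRep_cons_np (old new : List Char) (c : Char) (t : List Char)
    (h : old.isPrefixOf (c :: t) = false) :
    pvRep old new (c :: t) = c :: pvRep old new t := by
  rw [pvRep, h]; simp

theorem pvNot_prefix_false {old l : List Char} (h : ¬ old.isPrefixOf l = true) :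
    old.isPrefixOf l = false := by
  cases hh : old.isPrefixOf l with
  | false => rfl
  | true => exact absurd hh h

theorem pvTake2_head (a b : Char) (w x : List Char)
    (h : (a :: b :: w).take 2 = x.take 2) : x.head? = some a := by
  cases x with
  | nil => simp at h
  | cons x0 xs => simp_all

theorem pvGo_eq (old new : List Char) (hold : old ≠ []) :
    ∀ (fuel : Nat) (l acc : List Char), l.length ≤ fuel →
      PySem.Chars.replace.go old new fuel l acc = acc.reverse ++ pvRep old new l := by
  intro fuel
  induction fuel with
  | zero =>
    intro l acc h
    have hl : l = [] := by cases l with | nil => rfl | cons a t => simp at h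
    subst hl
    rw [PySem.Chars.replace.go.eq_def]
    simp [pvRep_nil]
  | succ n ih =>
    intro l acc h
    cases l with
    | nil => rw [PySem.Chars.replace.go.eq_def]; simp [pvRep_nil]
    | cons c t =>
      obtain ⟨o0, orest, rfl⟩ : ∃ o0 orest, old = o0 :: orest := by
        cases old with | nil => exact absurd rfl hold | cons a b => exact ⟨a, b, rfl⟩
      rw [PySem.Chars.replace.go.eq_def]
      by_cases hp : (o0 :: orest).isPrefixOf (c :: t) = true
      · simp only [hp, if_true]
        rw [ih]
        · rw [pvRep, if_pos hp]
          simp only [List.length_cons, List.drop_succ_cons, Nat.add_sub_cancel]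
          simp [List.append_assoc]
        · simp only [List.length_cons, List.length_drop, List.drop_succ_cons] at *
          omega
      · simp only [hp]
        rw [ih t (c :: acc) (by simp at h; omega)]
        rw [pvRep_cons_np _ _ _ _ (pvNot_prefix_false hp)]
        simp

theorem pvReplace_eq (old new s : List Char) (hold : old ≠ []) :
    PySem.Chars.replace s old new = pvRep old new s := by
  rw [PySem.Chars.replace]
  rw [if_neg (by simpa [List.isEmpty_iff] using hold)]
  rw [pvGo_eq old new hold s.length s [] (le_refl _)]
  simp

-- the fold step on the character level
def pvF : List Char → (List Char × List Char) → List Char := fun m p => pvRep p.1 p.2 m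

theorem pvFoldl_str_chars :
    ∀ (L : List (String × String)) (s : String), (∀ p ∈ L, p.1.toList ≠ []) →
      (L.foldl (fun m p => PySem.Str.replace m p.1 p.2) s).toList
        = (L.map (fun p => (p.1.toList, p.2.toList))).foldl pvF s.toList := by
  intro L
  induction L with
  | nil => intro s _; rfl
  | cons p L ih =>
    intro s h
    simp only [List.foldl_cons, List.map_cons]
    rw [ih _ (fun q hq => h q (List.mem_cons_of_mem _ hq))]
    have : (PySem.Str.replace s p.1 p.2).toList = pvF s.toList (p.1.toList, p.2.toList) := by
      rw [PySem.Str.toList_replace, pvReplace_eq _ _ _ (h p (List.mem_cons_self))]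
      rfl
    rw [this]

-- shape of every pair of the mapping: key and value are Upper-lower-lower 3-char lists
def pvGoodb (p : List Char × List Char) : Bool :=
  match p with
  | ([k0, k1, k2], [v0, v1, v2]) =>
    k0.isUpper && !k1.isUpper && !k2.isUpper && v0.isUpper && !v1.isUpper && !v2.isUpper
  | _ => false

theorem pvGood_shape (p : List Char × List Char) (h : pvGoodb p = true) :
    ∃ k0 k1 k2 v0 v1 v2, p = ([k0, k1, k2], [v0, v1, v2]) ∧
      k0.isUpper = true ∧ k1.isUpper = false ∧ k2.isUpper = false ∧
      v0.isUpper = true ∧ v1.isUpper = false ∧ v2.isUpper = false := by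
  obtain ⟨k, v⟩ := p
  rcases k with _ | ⟨k0, _ | ⟨k1, _ | ⟨k2, _ | ⟨k3, k'⟩⟩⟩⟩ <;>
    rcases v with _ | ⟨v0, _ | ⟨v1, _ | ⟨v2, _ | ⟨v3, v'⟩⟩⟩⟩ <;>
      simp_all [pvGoodb]

theorem pvGood_all : ∀ p ∈ pvMapC, pvGoodb p = true := by decide

theorem pvKeys_nodup : (pvMapC.map Prod.fst).Nodup := by decide

theorem pvVal_ne_key : ∀ p ∈ pvMapC, ∀ q ∈ pvMapC, p.2 ≠ q.1 := by decide

theorem pvNe_of_upper {a b : Char} (ha : a.isUpper = false) (hb : b.isUpper = true) : a ≠ b := by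
  intro h; rw [h, hb] at ha; exact absurd ha (by simp)

theorem pvPrefix3_shape (k0 k1 k2 : Char) (l : List Char)
    (h : ([k0, k1, k2] : List Char).isPrefixOf l = true) :
    ∃ t, l = k0 :: k1 :: k2 :: t := by
  rw [List.isPrefixOf_iff_prefix] at h
  obtain ⟨r, hr⟩ := h
  exact ⟨r, hr.symm⟩

theorem pvRep_pref3 (a b c : Char) (v t : List Char) :
    pvRep [a, b, c] v (a :: b :: c :: t) = v ++ pvRep [a, b, c] v t := by
  rw [pvRep, if_pos (by simp [List.isPrefixOf])]
  simp

theorem pvSkip3 (x y z : Char) (v : List Char) (a b c : Char) (t : List Char)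
    (h1 : ([a, b, c] : List Char) ≠ [x, y, z]) (h2 : b ≠ x) (h3 : c ≠ x) :
    pvRep [x, y, z] v (a :: b :: c :: t) = a :: b :: c :: pvRep [x, y, z] v t := by
  rw [pvRep_cons_np _ _ _ _ (by simp [List.isPrefixOf]; intro rfl1 rfl2 rfl3; exact h1 (by simp [rfl1, rfl2, rfl3]))]
  rw [pvRep_cons_np _ _ _ _ (by simp [List.isPrefixOf]; intro hx; exact absurd hx.symm h2)]
  rw [pvRep_cons_np _ _ _ _ (by simp [List.isPrefixOf]; intro hx; exact absurd hx.symm h3)]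

theorem pvRep_len (k0 k1 k2 v0 v1 v2 : Char) :
    ∀ (n : Nat) (l : List Char), l.length ≤ n →
      (pvRep [k0, k1, k2] [v0, v1, v2] l).length = l.length := by
  intro n
  induction n with
  | zero =>
    intro l h
    have hl : l = [] := by cases l with | nil => rfl | cons a t => simp at h
    subst hl; rw [pvRep_nil]
  | succ n ih =>
    intro l h
    cases l with
    | nil => rw [pvRep_nil]
    | cons c t =>
      by_cases hp : ([k0, k1, k2] : List Char).isPrefixOf (c :: t) = true
      · obtain ⟨t', ht⟩ := pvPrefix3_shape _ _ _ _ hp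
        rw [ht, pvRep_pref3]
        have : t'.length ≤ n := by rw [ht] at h; simp at h; omega
        simp [ih t' this]
      · rw [pvRep_cons_np _ _ _ _ (pvNot_prefix_false hp)]
        simp only [List.length_cons]
        rw [ih t (by simp at h; omega)]

-- invariant: the first two characters of the working string are either untouched,
-- or an uppercase replacement character sits in position 0 or 1
def pvInv (x y : List Char) : Prop :=
  y.take 2 = x.take 2 ∨ (∃ c cs, y = c :: cs ∧ c.isUpper = true) ∨
    (∃ c d cs, y = c :: d :: cs ∧ d.isUpper = true ∧ x.head? = some c)

theorem pvInv_step (k0 k1 k2 v0 v1 v2 : Char) (hv0 : v0.isUpper = true) (x w : List Char)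
    (hInv : pvInv x w) : pvInv x (pvRep [k0, k1, k2] [v0, v1, v2] w) := by
  cases w with
  | nil => rw [pvRep_nil]; exact hInv
  | cons a w1 =>
    by_cases h1 : ([k0, k1, k2] : List Char).isPrefixOf (a :: w1) = true
    · obtain ⟨t, ht⟩ := pvPrefix3_shape _ _ _ _ h1
      rw [ht, pvRep_pref3]
      exact Or.inr (Or.inl ⟨v0, _, rfl, hv0⟩)
    · rw [pvRep_cons_np _ _ _ _ (pvNot_prefix_false h1)]
      cases w1 with
      | nil => rw [pvRep_nil]; exact hInv
      | cons b w2 =>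
        by_cases h2 : ([k0, k1, k2] : List Char).isPrefixOf (b :: w2) = true
        · obtain ⟨t, ht⟩ := pvPrefix3_shape _ _ _ _ h2
          rw [ht, pvRep_pref3]
          have hxa : x.head? = some a ∨ a.isUpper = true :=  by
            rcases hInv with h | ⟨c, cs, hc, hup⟩ | ⟨c, d, cs, hc, hup, hx⟩
            · exact Or.inl (pvTake2_head _ _ _ _ h)
            · injection hc with h1' _
              exact Or.inr (by rw [h1']; exact hup)
            · injection hc with h1' _
              exact Or.inl (by rw [h1']; exact hx)
          rcases hxa with hx | hup
          · exact Or.inr (Or.inr ⟨a, v0, _, rfl, hv0, hx⟩)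
          · exact Or.inr (Or.inl ⟨a, _, rfl, hup⟩)
        · rw [pvRep_cons_np _ _ _ _ (pvNot_prefix_false h2)]
          rcases hInv with h | ⟨c, cs, hc, hup⟩ | ⟨c, d, cs, hc, hup, hx⟩
          · left; simpa using h
          · injection hc with h1' h2'
            exact Or.inr (Or.inl ⟨a, _, rfl, by rw [h1']; exact hup⟩)
          · injection hc with h1' h2'
            injection h2' with h3' _
            exact Or.inr (Or.inr ⟨a, b, _, rfl, by rw [h3']; exact hup, by rw [h1']; exact hx⟩)

theorem pvChain (c : Char) (x : List Char)
    (hnp : ∀ p ∈ pvMapC, p.1.isPrefixOf (c :: x) = false) :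
    ∀ (L : List (List Char × List Char)), (∀ p ∈ L, p ∈ pvMapC) →
      ∀ w, w.length = x.length → pvInv x w →
        L.foldl pvF (c :: w) = c :: L.foldl pvF w ∧
        (L.foldl pvF w).length = x.length ∧ pvInv x (L.foldl pvF w) := by
  intro L
  induction L with
  | nil => intro _ w hw hi; exact ⟨rfl, hw, hi⟩
  | cons p L ih =>
    intro hsub w hw hi
    have hpm : p ∈ pvMapC := hsub p List.mem_cons_self
    obtain ⟨k0, k1, k2, v0, v1, v2, hpeq, hk0, hk1, hk2, hv0, hv1, hv2⟩ :=
      pvGood_shape p (pvGood_all p hpm)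
    have hnpw : ([k0, k1, k2] : List Char).isPrefixOf (c :: w) = false := by
      cases hh : ([k0, k1, k2] : List Char).isPrefixOf (c :: w) with
      | false => rfl
      | true =>
        exfalso
        obtain ⟨t, ht⟩ := pvPrefix3_shape _ _ _ _ hh
        injection ht with hc0 hwt
        rcases hi with h | ⟨u0, us, hw0, hup⟩ | ⟨u0, u1, us, hw01, hup, hx⟩
        · -- first two characters untouched: the key would be a prefix of c :: x
          rw [hwt] at h
          cases x with
          | nil => rw [hwt] at hw; simp at hw
          | cons x0 xs =>
            cases xs with
            | nil => rw [hwt] at hw; simp at hw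
            | cons x1 xs' =>
              have hfalse := hnp p hpm
              rw [hpeq] at hfalse
              simp only at hfalse
              have htrue : ([k0, k1, k2] : List Char).isPrefixOf (c :: x0 :: x1 :: xs') = true := by
                simp only [List.take, List.cons.injEq] at h
                simp [List.isPrefixOf, hc0.symm, h.1, h.2.1]
              rw [htrue] at hfalse
              exact absurd hfalse (by simp)
        · rw [hwt] at hw0; injection hw0 with h0 _
          exact absurd hk1 (by rw [h0]; simp [hup])
        · rw [hwt] at hw01; injection hw01 with h0 h01; injection h01 with h1 _
          exact absurd hk2 (by rw [h1]; simp [hup])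
    have hstep : pvF (c :: w) p = c :: pvF w p := by
      rw [hpeq]; exact pvRep_cons_np _ _ _ _ hnpw
    have hlen' : (pvF w p).length = x.length := by
      rw [hpeq]
      show (pvRep [k0, k1, k2] [v0, v1, v2] w).length = x.length
      rw [pvRep_len k0 k1 k2 v0 v1 v2 w.length w (le_refl _)]
      exact hw
    have hinv' : pvInv x (pvF w p) := by
      rw [hpeq]; exact pvInv_step k0 k1 k2 v0 v1 v2 hv0 x w hi
    have := ih (fun q hq => hsub q (List.mem_cons_of_mem _ hq)) (pvF w p) hlen' hinv'
    refine ⟨?_, this.2.1, this.2.2⟩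
    simp only [List.foldl_cons]
    rw [hstep]
    exact this.1

theorem pvFoldl_skip (a b c : Char) (L : List (List Char × List Char))
    (h : ∀ p ∈ L, ∀ u, pvRep p.1 p.2 (a :: b :: c :: u) = a :: b :: c :: pvRep p.1 p.2 u) :
    ∀ u, L.foldl pvF (a :: b :: c :: u) = a :: b :: c :: L.foldl pvF u := by
  induction L with
  | nil => intro u; rfl
  | cons p L ih =>
    intro u
    simp only [List.foldl_cons]
    rw [show pvF (a :: b :: c :: u) p = a :: b :: c :: pvF u p from h p List.mem_cons_self u]
    exact ih (fun q hq => h q (List.mem_cons_of_mem _ hq)) (pvF u p)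

theorem pvKey_case (k v : List Char) (hm : (k, v) ∈ pvMapC) :
    ∀ u, pvMapC.foldl pvF (k ++ u) = v ++ pvMapC.foldl pvF u := by
  obtain ⟨k0, k1, k2, v0, v1, v2, hpeq, hk0, hk1, hk2, hv0, hv1, hv2⟩ :=
    pvGood_shape (k, v) (pvGood_all _ hm)
  injection hpeq with hkeq hveq
  subst hkeq; subst hveq
  obtain ⟨L1, L2, hsplit⟩ := List.append_of_mem hm
  have hmemL1 : ∀ p ∈ L1, p ∈ pvMapC := fun p hp => by
    rw [hsplit]; exact List.mem_append_left _ hp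
  have hmemL2 : ∀ p ∈ L2, p ∈ pvMapC := fun p hp => by
    rw [hsplit]; exact List.mem_append_right _ (List.mem_cons_of_mem _ hp)
  have hkeyne : ∀ p ∈ L1, p.1 ≠ [k0, k1, k2] := by
    intro p hp heq
    have := pvKeys_nodup
    rw [hsplit] at this
    simp only [List.map_append, List.map_cons] at this
    rw [List.nodup_append] at this
    exact this.2.2 p.1 (List.mem_map_of_mem hp) [k0, k1, k2] (by simp) heq
  have hsk1 : ∀ p ∈ L1, ∀ u, pvRep p.1 p.2 (k0 :: k1 :: k2 :: u) = k0 :: k1 :: k2 :: pvRep p.1 p.2 u := by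
    intro p hp u
    obtain ⟨a0, a1, a2, b0, b1, b2, hq, ha0, ha1, ha2, hb0, hb1, hb2⟩ :=
      pvGood_shape p (pvGood_all p (hmemL1 p hp))
    rw [hq]
    refine pvSkip3 _ _ _ _ _ _ _ _ ?_ (pvNe_of_upper hk1 ha0) (pvNe_of_upper hk2 ha0)
    intro hcon
    exact hkeyne p hp (by rw [hq]; exact hcon.symm)
  have hsk2 : ∀ p ∈ L2, ∀ u, pvRep p.1 p.2 (v0 :: v1 :: v2 :: u) = v0 :: v1 :: v2 :: pvRep p.1 p.2 u := by
    intro p hp u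
    obtain ⟨a0, a1, a2, b0, b1, b2, hq, ha0, ha1, ha2, hb0, hb1, hb2⟩ :=
      pvGood_shape p (pvGood_all p (hmemL2 p hp))
    rw [hq]
    refine pvSkip3 _ _ _ _ _ _ _ _ ?_ (pvNe_of_upper hv1 ha0) (pvNe_of_upper hv2 ha0)
    intro hcon
    have := pvVal_ne_key ([k0,k1,k2], [v0,v1,v2]) hm p (hmemL2 p hp)
    rw [hq] at this
    exact this (by simpa using hcon)
  intro u
  rw [hsplit]
  rw [List.foldl_append, List.foldl_append]
  simp only [List.foldl_cons]
  rw [show ([k0,k1,k2] : List Char) ++ u = k0 :: k1 :: k2 :: u from rfl]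
  rw [pvFoldl_skip _ _ _ _ hsk1 u]
  rw [show pvF (k0 :: k1 :: k2 :: List.foldl pvF u L1) ([k0,k1,k2], [v0,v1,v2])
        = v0 :: v1 :: v2 :: pvRep [k0,k1,k2] [v0,v1,v2] (List.foldl pvF u L1) from pvRep_pref3 _ _ _ _ _]
  rw [pvFoldl_skip _ _ _ _ hsk2]
  rfl

theorem pvScan_cons (c : Char) (t : List Char) :
    pvScan (c :: t) =
      match pvMapC.find? (fun p => p.1 == (c :: t).take 3) with
      | some p => p.2 ++ pvScan (t.drop 2)
      | none => c :: pvScan t := by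
  rw [pvScan.eq_def]

theorem pvMain : ∀ (n : Nat) (s : List Char), s.length ≤ n →
    pvMapC.foldl pvF s = pvScan s := by
  intro n
  induction n with
  | zero =>
    intro s h
    have hs : s = [] := by cases s with | nil => rfl | cons a t => simp at h
    subst hs
    simp [pvScan, pvMapC, pvF, pvRep_nil]
  | succ n ih =>
    intro s h
    cases s with
    | nil => simp [pvScan, pvMapC, pvF, pvRep_nil]
    | cons c t =>
      rcases hf : pvMapC.find? (fun p => p.1 == (c :: t).take 3) with _ | p
      · have hnp : ∀ p ∈ pvMapC, p.1.isPrefixOf (c :: t) = false := by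
          intro p hp
          obtain ⟨k0, k1, k2, v0, v1, v2, hq, _, _, _, _, _, _⟩ :=
            pvGood_shape p (pvGood_all p hp)
          cases hh : p.1.isPrefixOf (c :: t) with
          | false => rfl
          | true =>
            exfalso
            rw [hq] at hh
            simp only at hh
            obtain ⟨t', ht⟩ := pvPrefix3_shape _ _ _ _ hh
            have := List.find?_eq_none.mp hf p hp
            rw [hq] at this
            simp only at this
            apply this
            rw [ht]
            simp
        have h2 := pvChain c t hnp pvMapC (fun p hp => hp) t rfl (Or.inl rfl)
        rw [h2.1, ih t (by simp at h; omega)]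
        conv_rhs => rw [pvScan_cons]
        rw [hf]
      · have hmem := List.mem_of_find?_eq_some hf
        have heq : p.1 = (c :: t).take 3 := by
          have := List.find?_some hf
          simpa using this
        obtain ⟨k0, k1, k2, v0, v1, v2, hq, _, _, _, _, _, _⟩ :=
          pvGood_shape p (pvGood_all p hmem)
        rw [hq] at heq
        simp only at heq
        obtain ⟨t1, t2, rfl⟩ : ∃ t1 t2, t = t1 :: t2 := by
          cases t with
          | nil => simp at heq
          | cons a b => exact ⟨a, b, rfl⟩
        obtain ⟨u1, u2, rfl⟩ : ∃ u1 u2, t2 = u1 :: u2 := by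
          cases t2 with
          | nil => simp at heq
          | cons a b => exact ⟨a, b, rfl⟩
        simp only [List.take, List.cons.injEq] at heq
        obtain ⟨hc, ht1, ht2, -⟩ := heq
        have hs : c :: t1 :: u1 :: u2 = ([k0, k1, k2] : List Char) ++ u2 := by
          simp [hc, ht1, ht2]
        conv_lhs => rw [hs]
        rw [pvKey_case [k0, k1, k2] [v0, v1, v2] (hq ▸ hmem) u2]
        rw [ih u2 (by simp at h; omega)]
        conv_rhs => rw [pvScan_cons]
        rw [hf]
        simp [hq]

-- ===== VERDICT (by name: the statement is the Claim_ definition above) =====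
theorem change_month_to_english_spec : Claim_equal_change_month_to_english := by
  unfold Claim_equal_change_month_to_english Spec_change_month_to_english
  intro month _
  have hA : (change_month_to_english month).toList = pvMapC.foldl pvF month.toList := by
    rw [change_month_to_english]
    rw [pvFoldl_str_chars pvItems month (by decide)]
    rfl
  calc change_month_to_english month
      = String.ofList (change_month_to_english month).toList := String.ofList_toList.symm
    _ = String.ofList (pvScan month.toList) := by
        rw [hA, pvMain month.toList.length month.toList (le_refl _)]
    _ = change_month_to_english_alt month := rfl
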